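-- pv_equiv track=rewrite | github.com/edenojack/FY-Comp-Apps | Project/Library/BooleanMath.py | XOR_Gate
-- ===== SOURCE A (Python) =====
-- def XOR_Gate(Inputs):
--     # Iterate through each input, track if they are all true.
--     # If a given result is true, and a the current TrueResult is false, then consider us to be true
--     # If then *another* result is true, we are false.
--     TrueResults = False
--     for Key in Inputs:
--         Value = Inputs[Key]
--         if Value == True and TrueResults == False:
--             TrueResults = True
--         elif Value == True and TrueResults == True:
--             TrueResults = False
--             break # Exit the loop early, no need to continue if we are going to be false
--
--     # Return results
--     if TrueResults:     # If the result is true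
--         return True     # Return true
--     else:               # If the statement isn't true
--         return False    # return false
-- ===== SOURCE B (Python) =====
-- def XOR_Gate(Inputs):
--     # Count-then-compare: exactly one value equal to True.
--     count = sum(1 for v in Inputs.values() if v == True)
--     return count == 1
-- ===== Notes on version B (the rewrite author's own statement) =====
-- stated objective: simpler
-- what changed: Replaces the toggle-state-machine with early break by counting the values equal to True once and comparing the count to one.
import Mathlib
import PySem

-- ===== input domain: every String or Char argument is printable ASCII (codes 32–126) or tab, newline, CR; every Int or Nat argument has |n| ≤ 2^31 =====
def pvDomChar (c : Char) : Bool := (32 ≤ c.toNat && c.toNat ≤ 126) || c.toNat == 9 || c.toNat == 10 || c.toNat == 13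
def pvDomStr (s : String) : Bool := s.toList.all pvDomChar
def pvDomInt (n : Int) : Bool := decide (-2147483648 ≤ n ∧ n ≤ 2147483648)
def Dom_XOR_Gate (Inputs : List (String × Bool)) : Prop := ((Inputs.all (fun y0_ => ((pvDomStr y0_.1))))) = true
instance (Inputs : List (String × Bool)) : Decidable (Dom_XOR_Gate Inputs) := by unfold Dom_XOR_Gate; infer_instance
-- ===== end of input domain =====

-- B replaces A's toggle state machine (with early break) by counting the True values and comparing to one; objective: simpler.

-- ===== PORT A =====
-- the for-loop over the dict's keys with the mutable TrueResults flag and the 'break'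
def XOR_Gate_loop (keys : List (String × Bool)) (TrueResults : Bool) : Bool :=
  match keys with
  | [] => TrueResults
  | (_, Value) :: rest =>
    if Value == true && TrueResults == false then XOR_Gate_loop rest true
    else if Value == true && TrueResults == true then false   -- break with TrueResults = False
    else XOR_Gate_loop rest TrueResults

def XOR_Gate (Inputs : List (String × Bool)) : Bool :=
  let TrueResults := XOR_Gate_loop Inputs false
  if TrueResults then true else false

-- ===== PORT B =====
def XOR_Gate_alt (Inputs : List (String × Bool)) : Bool :=
  let count := (Inputs.map Prod.snd).countP (fun v => v == true)
  count == 1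

-- ===== PRECONDITION & SPEC =====
def Spec_XOR_Gate (Inputs : List (String × Bool)) (out : Bool) : Prop := out = XOR_Gate_alt Inputs
instance (Inputs : List (String × Bool)) (out : Bool) : Decidable (Spec_XOR_Gate Inputs out) := by unfold Spec_XOR_Gate; infer_instance

-- ===== CLAIM (what is proved, stated in full; the proofs are below) =====
def Claim_equal_XOR_Gate : Prop := ∀ (Inputs : List (String × Bool)), Dom_XOR_Gate Inputs → Spec_XOR_Gate Inputs (XOR_Gate Inputs)

-- ===== LEMMAS AND PROOFS =====

-- loop invariant: the toggle loop returns true iff the remaining count plus the flag is exactly one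
theorem XOR_Gate_loop_count (keys : List (String × Bool)) (t : Bool) :
    XOR_Gate_loop keys t
      = ((keys.map Prod.snd).countP (fun v => v == true) + (if t then 1 else 0) == 1) := by
  induction keys generalizing t with
  | nil => cases t <;> simp [XOR_Gate_loop]
  | cons hd tl ih =>
    obtain ⟨k, v⟩ := hd
    cases v <;> cases t <;>
      simp [XOR_Gate_loop, ih]

-- ===== VERDICT (by name: the statement is the Claim_ definition above) =====
theorem XOR_Gate_spec : Claim_equal_XOR_Gate := by
  intro Inputs _
  unfold Spec_XOR_Gate XOR_Gate XOR_Gate_alt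
  rw [XOR_Gate_loop_count]
  simp [beq_eq_decide]
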